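-- pv_equiv track=rewrite | github.com/paiml/depyler | examples/hard_functional_patterns.py | tally_stats
-- ===== SOURCE A (Python) =====
-- def tally_stats(vals: list[int]) -> list[int]:
--     """Compute [count, sum, min, max] in single pass."""
--     if len(vals) == 0:
--         return [0, 0, 0, 0]
--     count: int = 0
--     total: int = 0
--     lo: int = vals[0]
--     hi: int = vals[0]
--     for v in vals:
--         count += 1
--         total += v
--         if v < lo:
--             lo = v
--         if v > hi:
--             hi = v
--     return [count, total, lo, hi]
-- ===== SOURCE B (Python) =====
-- def tally_stats(vals: list[int]) -> list[int]:
--     """Compute [count, sum, min, max] via built-in reductions."""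
--     if not vals:
--         return [0, 0, 0, 0]
--     return [len(vals), sum(vals), min(vals), max(vals)]
-- ===== Notes on version B (the rewrite author's own statement) =====
-- stated objective: idiomatic
-- what changed: Replaces the single fused accumulator loop with an empty guard plus four independent built-in reductions (len/sum/min/max), i.e. four library traversals instead of one manual pass.
import Mathlib
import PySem

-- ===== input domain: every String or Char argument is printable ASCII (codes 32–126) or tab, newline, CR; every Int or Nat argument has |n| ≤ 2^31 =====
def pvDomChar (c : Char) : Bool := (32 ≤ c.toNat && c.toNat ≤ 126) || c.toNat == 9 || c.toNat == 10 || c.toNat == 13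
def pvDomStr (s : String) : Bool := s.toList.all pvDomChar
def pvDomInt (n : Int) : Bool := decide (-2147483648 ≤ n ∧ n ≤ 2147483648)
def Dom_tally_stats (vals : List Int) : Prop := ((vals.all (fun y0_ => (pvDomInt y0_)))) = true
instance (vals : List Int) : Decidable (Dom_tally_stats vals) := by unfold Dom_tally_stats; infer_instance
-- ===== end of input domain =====

-- B replaces A's single fused accumulator loop with an empty guard plus four
-- independent built-in reductions (len/sum/min/max); idiomatic, same O(n) cost.

-- ===== PORT A =====
-- literal port of A: one fold carrying (count, total, lo, hi)
def tally_stats (vals : List Int) : List Int :=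
  if vals.length = 0 then [0, 0, 0, 0]
  else
    match vals with
    | [] => [0, 0, 0, 0]
    | x :: _ =>
      let s := vals.foldl
        (fun (s : Int × Int × Int × Int) v =>
          (s.1 + 1, s.2.1 + v,
           if v < s.2.2.1 then v else s.2.2.1,
           if v > s.2.2.2 then v else s.2.2.2))
        (0, 0, x, x)
      [s.1, s.2.1, s.2.2.1, s.2.2.2]

-- ===== PORT B =====
-- port of Source B: len / sum / min / max as library reductions
-- (Python's min/max with no key are the running fold, per PYSEM)
def tally_stats_alt (vals : List Int) : List Int :=
  match vals with
  | [] => [0, 0, 0, 0]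
  | x :: t => [(vals.length : Int), vals.sum, t.foldl min x, t.foldl max x]

-- ===== PRECONDITION & SPEC =====
def Spec_tally_stats (vals : List Int) (out : List Int) : Prop := out = tally_stats_alt vals
instance (vals : List Int) (out : List Int) : Decidable (Spec_tally_stats vals out) := by unfold Spec_tally_stats; infer_instance

-- ===== CLAIM (what is proved, stated in full; the proofs are below) =====
def Claim_equal_tally_stats : Prop := ∀ (vals : List Int), Dom_tally_stats vals → Spec_tally_stats vals (tally_stats vals)

-- ===== LEMMAS AND PROOFS =====
lemma tally_loop (l : List Int) (c t lo hi : Int) :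
    l.foldl
      (fun (s : Int × Int × Int × Int) v =>
        (s.1 + 1, s.2.1 + v,
         if v < s.2.2.1 then v else s.2.2.1,
         if v > s.2.2.2 then v else s.2.2.2))
      (c, t, lo, hi)
    = (c + l.length, t + l.sum, l.foldl min lo, l.foldl max hi) := by
  induction l generalizing c t lo hi with
  | nil => simp
  | cons v l ih =>
    simp only [List.foldl_cons, ih, List.length_cons, List.sum_cons]
    refine Prod.ext ?_ (Prod.ext ?_ (Prod.ext ?_ ?_)) <;> simp <;>
      first
      | omega
      | (congr 1; rw [Int.min_def]; split_ifs <;> omega)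
      | (congr 1; rw [Int.max_def]; split_ifs <;> omega)

-- ===== VERDICT (by name: the statement is the Claim_ definition above) =====
theorem tally_stats_spec : Claim_equal_tally_stats := by
  intro vals _
  unfold Spec_tally_stats tally_stats tally_stats_alt
  match vals with
  | [] => simp
  | x :: t =>
    simp only [List.length_cons, List.foldl_cons, tally_loop]
    simp
    omega
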